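-- pv_equiv track=rewrite | github.com/info5starmedia-jpg/viking-ai | bot.py | _city_tier_score
-- ===== SOURCE A (Python) =====
-- def _city_tier_score(city: str) -> int:
--     city_lower = (city or "").lower()
--     if any(key in city_lower for key in ["new york", "los angeles", "chicago"]):
--         return 95
--     if any(key in city_lower for key in ["dallas", "houston", "atlanta", "san francisco"]):
--         return 85
--     if any(key in city_lower for key in ["seattle", "boston", "philadelphia", "miami"]):
--         return 80
--     return 70
-- ===== SOURCE B (Python) =====
-- _TIER_SCORES = {
--     "new york": 95, "los angeles": 95, "chicago": 95,
--     "dallas": 85, "houston": 85, "atlanta": 85, "san francisco": 85,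
--     "seattle": 80, "boston": 80, "philadelphia": 80, "miami": 80,
-- }
--
-- def _city_tier_score(city: str) -> int:
--     city_lower = (city or "").lower()
--     return max((score for key, score in _TIER_SCORES.items() if key in city_lower),
--                default=70)
-- ===== Notes on version B (the rewrite author's own statement) =====
-- stated objective: simpler
-- what changed: Replaced the four ordered short-circuit branches by one flat keyword->score table aggregated with max(..., default=70); correct because tier priority coincides with score magnitude.
import Mathlib
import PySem

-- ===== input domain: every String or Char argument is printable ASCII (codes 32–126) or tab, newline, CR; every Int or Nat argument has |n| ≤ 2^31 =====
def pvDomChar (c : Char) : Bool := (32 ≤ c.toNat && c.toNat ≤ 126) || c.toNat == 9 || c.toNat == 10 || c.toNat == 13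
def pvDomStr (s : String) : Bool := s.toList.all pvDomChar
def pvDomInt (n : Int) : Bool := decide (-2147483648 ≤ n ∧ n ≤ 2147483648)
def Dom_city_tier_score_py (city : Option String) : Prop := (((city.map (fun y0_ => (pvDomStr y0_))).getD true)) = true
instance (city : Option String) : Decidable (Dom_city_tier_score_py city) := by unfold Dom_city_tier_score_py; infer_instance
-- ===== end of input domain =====

-- B replaces A's four ordered short-circuit branches by one flat keyword->score
-- table aggregated with max (default 70); simpler decomposition, same cost.

-- ===== PORT A =====
def city_tier_score_py (city : Option String) : Int :=
  let city_lower := PySem.Str.lower (city.getD "")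
  if ["new york", "los angeles", "chicago"].any (fun key => PySem.Str.isIn key city_lower) then 95
  else if ["dallas", "houston", "atlanta", "san francisco"].any (fun key => PySem.Str.isIn key city_lower) then 85
  else if ["seattle", "boston", "philadelphia", "miami"].any (fun key => PySem.Str.isIn key city_lower) then 80
  else 70

-- ===== PORT B =====
def tierScores : List (String × Int) :=
  [("new york", 95), ("los angeles", 95), ("chicago", 95),
   ("dallas", 85), ("houston", 85), ("atlanta", 85), ("san francisco", 85),
   ("seattle", 80), ("boston", 80), ("philadelphia", 80), ("miami", 80)]

def city_tier_score_py_alt (city : Option String) : Int :=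
  let city_lower := PySem.Str.lower (city.getD "")
  ((tierScores.filterMap (fun p => if PySem.Str.isIn p.1 city_lower then some p.2 else none)).max?).getD 70

-- ===== PRECONDITION & SPEC =====
def Spec_city_tier_score_py (city : Option String) (out : Int) : Prop := out = city_tier_score_py_alt city
instance (city : Option String) (out : Int) : Decidable (Spec_city_tier_score_py city out) := by unfold Spec_city_tier_score_py; infer_instance

-- ===== CLAIM (what is proved, stated in full; the proofs are below) =====
def Claim_equal_city_tier_score_py : Prop := ∀ (city : Option String), Dom_city_tier_score_py city → Spec_city_tier_score_py city (city_tier_score_py city)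

-- ===== LEMMAS AND PROOFS =====

-- ===== VERDICT (by name: the statement is the Claim_ definition above) =====
set_option maxHeartbeats 1000000 in
theorem city_tier_score_py_spec : Claim_equal_city_tier_score_py := by
  intro city _
  unfold Spec_city_tier_score_py city_tier_score_py city_tier_score_py_alt tierScores
  set l := PySem.Str.lower (city.getD "") with hl
  simp only [List.any_cons, List.any_nil, Bool.or_false, List.filterMap_cons, List.filterMap_nil]
  generalize PySem.Str.isIn "new york" l = b1
  generalize PySem.Str.isIn "los angeles" l = b2
  generalize PySem.Str.isIn "chicago" l = b3
  generalize PySem.Str.isIn "dallas" l = b4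
  generalize PySem.Str.isIn "houston" l = b5
  generalize PySem.Str.isIn "atlanta" l = b6
  generalize PySem.Str.isIn "san francisco" l = b7
  generalize PySem.Str.isIn "seattle" l = b8
  generalize PySem.Str.isIn "boston" l = b9
  generalize PySem.Str.isIn "philadelphia" l = b10
  generalize PySem.Str.isIn "miami" l = b11
  revert b1 b2 b3 b4 b5 b6 b7 b8 b9 b10 b11
  decide
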